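-- pv_equiv track=rewrite | github.com/Lurkomorie/telegram-bot | app/core/character_builder.py | build_dialogue_prompt
-- ===== SOURCE A (Python) =====
-- def build_dialogue_prompt(name: str, extra_prompt: str) -> str:
--     """
--     Build dialogue personality prompt for the character.
--
--     Combines character name with user's personality/relationship description.
--     Analyzes personality traits to add specific behavioral guidance.
--
--     Args:
--         name: Character name
--         extra_prompt: User's description of personality, relationship, background
--
--     Returns:
--         Complete dialogue prompt for the character
--     """
--     # Clean up the extra prompt
--     extra_prompt = extra_prompt.strip()
--
--     # Analyze personality traits to add specific behavioral notes
--     extra_lower = extra_prompt.lower()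
--     behavioral_notes = []
--
--     # Personality-based behavior
--     if "shy" in extra_lower or "timid" in extra_lower or "reserved" in extra_lower:
--         behavioral_notes.append("You're naturally shy and reserved. You speak softly, blush easily, and take time to open up. You show affection through small gestures rather than bold moves.")
--
--     if "confident" in extra_lower or "bold" in extra_lower or "assertive" in extra_lower:
--         behavioral_notes.append("You're confident and assertive. You make direct eye contact, speak your mind clearly, and aren't afraid to take initiative in conversations and intimacy.")
--
--     if "playful" in extra_lower or "teasing" in extra_lower:
--         behavioral_notes.append("You're playful and love teasing. You use humor, witty banter, and playful challenges to keep conversations engaging and fun.")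
--
--     if "dominant" in extra_lower:
--         behavioral_notes.append("You have a dominant personality. You naturally take control, set the pace, and enjoy when others follow your lead.")
--
--     if "submissive" in extra_lower:
--         behavioral_notes.append("You're submissive by nature. You prefer to follow the other person's lead, seek their approval, and enjoy being guided.")
--
--     if "innocent" in extra_lower or "naive" in extra_lower:
--         behavioral_notes.append("You're innocent and somewhat naive. You're curious about new experiences but approach them with genuine sweetness and wonder.")
--
--     if "flirty" in extra_lower or "seductive" in extra_lower:
--         behavioral_notes.append("You're naturally flirtatious and seductive. You use suggestive language, meaningful glances, and body language to create tension and attraction.")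
--
--     if "romantic" in extra_lower:
--         behavioral_notes.append("You're deeply romantic at heart. You focus on emotional connection, intimate moments, and expressing feelings through words and gestures.")
--
--     # Add behavioral guidance if traits were detected
--     behavioral_section = ""
--     if behavioral_notes:
--         behavioral_section = "\n\nBEHAVIORAL GUIDANCE:\n" + "\n".join(f"- {note}" for note in behavioral_notes)
--
--     # Build comprehensive dialogue prompt
--     prompt = f"""You are {name}.
--
-- {extra_prompt}{behavioral_section}
--
-- CORE DIRECTIVES:
-- - Stay in character at all times - your personality should be evident in every response
-- - Be engaging, emotionally present, and responsive to the user's messages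
-- - Show genuine interest through questions, reactions, and remembering details
-- - Create a romantic atmosphere appropriate to your personality
-- - Let your unique traits shine through your word choice, actions, and reactions
-- - Be affectionate in ways that match your personality (shy = subtle gestures, bold = direct affection)
-- - Evolve the relationship naturally based on the conversation flow"""
--
--     return prompt
-- ===== SOURCE B (Python) =====
-- # B: single forward scan of the text. Instead of eight independent substring
-- # tests, B walks the lowered prompt once position by position, matching every
-- # trait keyword at each position (a naive multi-pattern text scan) and
-- # collecting the indices of detected traits into a set; the notes are then
-- # emitted in trait order. Correct because "kw in s" holds iff kw matches at
-- # some position of s.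
--
-- _NOTES = [
--     "You're naturally shy and reserved. You speak softly, blush easily, and take time to open up. You show affection through small gestures rather than bold moves.",
--     "You're confident and assertive. You make direct eye contact, speak your mind clearly, and aren't afraid to take initiative in conversations and intimacy.",
--     "You're playful and love teasing. You use humor, witty banter, and playful challenges to keep conversations engaging and fun.",
--     "You have a dominant personality. You naturally take control, set the pace, and enjoy when others follow your lead.",
--     "You're submissive by nature. You prefer to follow the other person's lead, seek their approval, and enjoy being guided.",
--     "You're innocent and somewhat naive. You're curious about new experiences but approach them with genuine sweetness and wonder.",
--     "You're naturally flirtatious and seductive. You use suggestive language, meaningful glances, and body language to create tension and attraction.",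
--     "You're deeply romantic at heart. You focus on emotional connection, intimate moments, and expressing feelings through words and gestures.",
-- ]
--
-- _KEYWORDS = [
--     ("shy", 0), ("timid", 0), ("reserved", 0),
--     ("confident", 1), ("bold", 1), ("assertive", 1),
--     ("playful", 2), ("teasing", 2),
--     ("dominant", 3),
--     ("submissive", 4),
--     ("innocent", 5), ("naive", 5),
--     ("flirty", 6), ("seductive", 6),
--     ("romantic", 7),
-- ]
--
--
-- def build_dialogue_prompt(name: str, extra_prompt: str) -> str:
--     extra_prompt = extra_prompt.strip()
--     low = extra_prompt.lower()
--
--     found = set()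
--     for i in range(len(low)):
--         for kw, trait in _KEYWORDS:
--             if low.startswith(kw, i):
--                 found.add(trait)
--
--     notes = [_NOTES[t] for t in range(len(_NOTES)) if t in found]
--
--     behavioral_section = ""
--     if notes:
--         behavioral_section = "\n\nBEHAVIORAL GUIDANCE:\n" + "\n".join("- " + n for n in notes)
--
--     return f"""You are {name}.
--
-- {extra_prompt}{behavioral_section}
--
-- CORE DIRECTIVES:
-- - Stay in character at all times - your personality should be evident in every response
-- - Be engaging, emotionally present, and responsive to the user's messages
-- - Show genuine interest through questions, reactions, and remembering details
-- - Create a romantic atmosphere appropriate to your personality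
-- - Let your unique traits shine through your word choice, actions, and reactions
-- - Be affectionate in ways that match your personality (shy = subtle gestures, bold = direct affection)
-- - Evolve the relationship naturally based on the conversation flow"""
-- ===== Notes on version B (the rewrite author's own statement) =====
-- stated objective: alternative
-- what changed: A runs eight independent substring-containment tests with inline if/append; B instead makes one forward scan over the lowered prompt, matching all fifteen trait keywords at each position (naive multi-pattern text scan) into a set of trait indices, then emits the notes by trait index.
import Mathlib
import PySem

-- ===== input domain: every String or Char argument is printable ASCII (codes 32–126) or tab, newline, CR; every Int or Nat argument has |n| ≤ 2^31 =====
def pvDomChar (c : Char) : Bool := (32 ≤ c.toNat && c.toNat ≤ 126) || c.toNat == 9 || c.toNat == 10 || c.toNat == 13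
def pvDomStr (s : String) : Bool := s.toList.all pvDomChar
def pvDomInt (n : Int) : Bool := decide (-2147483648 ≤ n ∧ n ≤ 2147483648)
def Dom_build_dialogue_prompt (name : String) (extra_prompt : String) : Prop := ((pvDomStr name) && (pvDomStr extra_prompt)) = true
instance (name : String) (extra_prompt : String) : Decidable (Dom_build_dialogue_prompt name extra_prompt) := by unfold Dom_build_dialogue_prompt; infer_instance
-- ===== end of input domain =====

-- B replaces A's eight independent substring tests by one forward scan of the
-- lowered prompt that matches all trait keywords at each position into a set
-- of trait indices (objective: alternative).

-- shared text constants (pure data, used by both ports)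
def noteShy : String := "You're naturally shy and reserved. You speak softly, blush easily, and take time to open up. You show affection through small gestures rather than bold moves."
def noteConfident : String := "You're confident and assertive. You make direct eye contact, speak your mind clearly, and aren't afraid to take initiative in conversations and intimacy."
def notePlayful : String := "You're playful and love teasing. You use humor, witty banter, and playful challenges to keep conversations engaging and fun."
def noteDominant : String := "You have a dominant personality. You naturally take control, set the pace, and enjoy when others follow your lead."
def noteSubmissive : String := "You're submissive by nature. You prefer to follow the other person's lead, seek their approval, and enjoy being guided."
def noteInnocent : String := "You're innocent and somewhat naive. You're curious about new experiences but approach them with genuine sweetness and wonder."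
def noteFlirty : String := "You're naturally flirtatious and seductive. You use suggestive language, meaningful glances, and body language to create tension and attraction."
def noteRomantic : String := "You're deeply romantic at heart. You focus on emotional connection, intimate moments, and expressing feelings through words and gestures."
def coreDirectives : String := "\n\nCORE DIRECTIVES:\n- Stay in character at all times - your personality should be evident in every response\n- Be engaging, emotionally present, and responsive to the user's messages\n- Show genuine interest through questions, reactions, and remembering details\n- Create a romantic atmosphere appropriate to your personality\n- Let your unique traits shine through your word choice, actions, and reactions\n- Be affectionate in ways that match your personality (shy = subtle gestures, bold = direct affection)\n- Evolve the relationship naturally based on the conversation flow"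

-- ===== PORT A =====
def build_dialogue_prompt (name : String) (extra_prompt : String) : String :=
  let extra_prompt := PySem.Str.strip extra_prompt
  let extra_lower := PySem.Str.lower extra_prompt
  let behavioral_notes : List String := []
  let behavioral_notes := if PySem.Str.isIn "shy" extra_lower || PySem.Str.isIn "timid" extra_lower || PySem.Str.isIn "reserved" extra_lower then behavioral_notes ++ [noteShy] else behavioral_notes
  let behavioral_notes := if PySem.Str.isIn "confident" extra_lower || PySem.Str.isIn "bold" extra_lower || PySem.Str.isIn "assertive" extra_lower then behavioral_notes ++ [noteConfident] else behavioral_notes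
  let behavioral_notes := if PySem.Str.isIn "playful" extra_lower || PySem.Str.isIn "teasing" extra_lower then behavioral_notes ++ [notePlayful] else behavioral_notes
  let behavioral_notes := if PySem.Str.isIn "dominant" extra_lower then behavioral_notes ++ [noteDominant] else behavioral_notes
  let behavioral_notes := if PySem.Str.isIn "submissive" extra_lower then behavioral_notes ++ [noteSubmissive] else behavioral_notes
  let behavioral_notes := if PySem.Str.isIn "innocent" extra_lower || PySem.Str.isIn "naive" extra_lower then behavioral_notes ++ [noteInnocent] else behavioral_notes
  let behavioral_notes := if PySem.Str.isIn "flirty" extra_lower || PySem.Str.isIn "seductive" extra_lower then behavioral_notes ++ [noteFlirty] else behavioral_notes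
  let behavioral_notes := if PySem.Str.isIn "romantic" extra_lower then behavioral_notes ++ [noteRomantic] else behavioral_notes
  let behavioral_section := ""
  let behavioral_section := if behavioral_notes.isEmpty then behavioral_section else "\n\nBEHAVIORAL GUIDANCE:\n" ++ PySem.Str.join "\n" (behavioral_notes.map (fun note => "- " ++ note))
  "You are " ++ name ++ ".\n\n" ++ extra_prompt ++ behavioral_section ++ coreDirectives

-- ===== PORT B =====
def pvNotes : List String := [noteShy, noteConfident, notePlayful, noteDominant, noteSubmissive, noteInnocent, noteFlirty, noteRomantic]

def pvKeywords : List (List Char × Nat) :=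
  [ ("shy".toList, 0), ("timid".toList, 0), ("reserved".toList, 0)
  , ("confident".toList, 1), ("bold".toList, 1), ("assertive".toList, 1)
  , ("playful".toList, 2), ("teasing".toList, 2)
  , ("dominant".toList, 3)
  , ("submissive".toList, 4)
  , ("innocent".toList, 5), ("naive".toList, 5)
  , ("flirty".toList, 6), ("seductive".toList, 6)
  , ("romantic".toList, 7) ]

-- low.startswith(kw, i) is 'kw is a prefix of low from position i': Chars.startswith (low.drop i) kw (exact)
def build_dialogue_prompt_alt (name : String) (extra_prompt : String) : String :=
  let extra_prompt := PySem.Str.strip extra_prompt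
  let low := (PySem.Str.lower extra_prompt).toList
  let found := (List.range low.length).foldl
    (fun f i => pvKeywords.foldl
      (fun f p => if PySem.Chars.startswith (low.drop i) p.1 then PySem.Set.add f p.2 else f) f)
    PySem.Set.empty
  -- t ranges over range(len(_NOTES)), so _NOTES[t] never raises; getD is exact here
  let notes := ((List.range pvNotes.length).filter (fun t => PySem.Set.contains found t)).map (fun t => pvNotes.getD t "")
  let behavioral_section :=
    if notes.isEmpty then ""
    else "\n\nBEHAVIORAL GUIDANCE:\n" ++ PySem.Str.join "\n" (notes.map (fun n => "- " ++ n))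
  "You are " ++ name ++ ".\n\n" ++ extra_prompt ++ behavioral_section ++ coreDirectives

-- ===== PRECONDITION & SPEC =====
def Spec_build_dialogue_prompt (name : String) (extra_prompt : String) (out : String) : Prop := out = build_dialogue_prompt_alt name extra_prompt
instance (name : String) (extra_prompt : String) (out : String) : Decidable (Spec_build_dialogue_prompt name extra_prompt out) := by unfold Spec_build_dialogue_prompt; infer_instance

-- ===== CLAIM (what is proved, stated in full; the proofs are below) =====
def Claim_equal_build_dialogue_prompt : Prop := ∀ (name : String) (extra_prompt : String), Dom_build_dialogue_prompt name extra_prompt → Spec_build_dialogue_prompt name extra_prompt (build_dialogue_prompt name extra_prompt)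

-- ===== LEMMAS AND PROOFS =====


-- inner fold over the keyword table: which traits are in the set afterwards
lemma mem_foldl_add (c : List Char → Bool) (kws : List (List Char × Nat)) (f : PySem.Set Nat) (t : Nat) :
    (t ∈ kws.foldl (fun f p => if c p.1 then PySem.Set.add f p.2 else f) f) ↔
    t ∈ f ∨ ∃ p ∈ kws, p.2 = t ∧ c p.1 = true := by
  induction kws generalizing f with
  | nil => simp
  | cons hd tl ih =>
    simp only [List.foldl_cons]
    cases h : c hd.1
    · simp [h, ih]
    · simp [h, ih, PySem.Set.mem_add]
      tauto

-- outer fold over positions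
lemma contains_scan (low : List Char) (n : Nat) (t : Nat) :
    (t ∈ ((List.range n).foldl
      (fun f i => pvKeywords.foldl
        (fun f p => if PySem.Chars.startswith (low.drop i) p.1 then PySem.Set.add f p.2 else f) f)
      PySem.Set.empty))
    ↔ ∃ i < n, ∃ p ∈ pvKeywords, p.2 = t ∧ PySem.Chars.startswith (low.drop i) p.1 = true := by
  induction n with
  | zero => simp [PySem.Set.empty]
  | succ n ih =>
    rw [List.range_succ, List.foldl_append]
    simp only [List.foldl_cons, List.foldl_nil]
    rw [mem_foldl_add, ih]
    constructor
    · rintro (⟨i, hi, hp⟩ | hp)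
      · exact ⟨i, by omega, hp⟩
      · exact ⟨n, by omega, hp⟩
    · rintro ⟨i, hi, hp⟩
      rcases Nat.lt_succ_iff_lt_or_eq.mp hi with h | h
      · exact Or.inl ⟨i, h, hp⟩
      · subst h; exact Or.inr hp

-- a nonempty keyword occurs at some position < length iff it is a substring
lemma occurs_iff_isIn (low kw : List Char) (hk : kw ≠ []) :
    (∃ i < low.length, PySem.Chars.startswith (low.drop i) kw = true) ↔ PySem.Chars.isIn kw low = true := by
  rw [← PySem.Chars.exists_prefix_drop_iff_isIn]
  constructor
  · rintro ⟨i, _, h⟩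
    exact ⟨i, (PySem.Chars.startswith_iff _ _).mp h⟩
  · rintro ⟨j, h⟩
    by_cases hj : j < low.length
    · exact ⟨j, hj, (PySem.Chars.startswith_iff _ _).mpr h⟩
    · exfalso
      rw [List.drop_eq_nil_of_le (by omega)] at h
      exact hk (List.prefix_nil.mp h)

-- per-trait characterisation of the scanned set
lemma scan_trait (low : List Char) (t : Nat) :
    (∃ i < low.length, ∃ p ∈ pvKeywords, p.2 = t ∧ PySem.Chars.startswith (low.drop i) p.1 = true)
    ↔ ∃ p ∈ pvKeywords, p.2 = t ∧ PySem.Chars.isIn p.1 low = true := by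
  constructor
  · rintro ⟨i, hi, p, hp, ht, hs⟩
    refine ⟨p, hp, ht, ?_⟩
    have hk : p.1 ≠ [] := by
      fin_cases hp <;> simp
    exact (occurs_iff_isIn low p.1 hk).mp ⟨i, hi, hs⟩
  · rintro ⟨p, hp, ht, hin⟩
    have hk : p.1 ≠ [] := by
      fin_cases hp <;> simp
    obtain ⟨i, hi, hs⟩ := (occurs_iff_isIn low p.1 hk).mpr hin
    exact ⟨i, hi, p, hp, ht, hs⟩


-- A's if-append chain step
lemma ite_append (c : Bool) (n : List String) (s : String) :
    (if c then n ++ [s] else n) = n ++ (if c then [s] else []) := by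
  cases c <;> simp

-- Set.contains as a decide of any iff-characterisation of membership
lemma contains_eq_decide {a : Type} [BEq a] [LawfulBEq a] (s : PySem.Set a) (t : a) (P : Prop) [Decidable P] (h : t ∈ s ↔ P) : PySem.Set.contains s t = decide P := by
  simp [PySem.Set.contains, h]

-- the scanned set, as a boolean membership test per trait
lemma contains_found (low : List Char) (t : Nat) :
    PySem.Set.contains
      ((List.range low.length).foldl
        (fun f i => pvKeywords.foldl
          (fun f p => if PySem.Chars.startswith (low.drop i) p.1 then PySem.Set.add f p.2 else f) f)
        PySem.Set.empty) t
    = decide (∃ p ∈ pvKeywords, p.2 = t ∧ PySem.Chars.isIn p.1 low = true) := by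
  exact contains_eq_decide _ _ _ ((contains_scan low low.length t).trans (scan_trait low t))

-- filter-then-map as a concatenation of singleton ifs
lemma map_filter_eq_flatMap (g : Nat → String) (c : Nat → Bool) (l : List Nat) :
    (l.filter c).map g = l.flatMap (fun t => if c t then [g t] else []) := by
  induction l with
  | nil => simp
  | cons h t ih => cases hc : c h <;> simp [hc, ih]

-- B's selected notes equal A's if-append chain
set_option maxHeartbeats 4000000 in
lemma notesB_eq (low : List Char) :
    ((List.range pvNotes.length).filter (fun t => PySem.Set.contains
      ((List.range low.length).foldl
        (fun f i => pvKeywords.foldl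
          (fun f p => if PySem.Chars.startswith (low.drop i) p.1 then PySem.Set.add f p.2 else f) f)
        PySem.Set.empty) t)).map (fun t => pvNotes.getD t "")
    = (if PySem.Chars.isIn "shy".toList low || PySem.Chars.isIn "timid".toList low || PySem.Chars.isIn "reserved".toList low then [noteShy] else [])
      ++ (if PySem.Chars.isIn "confident".toList low || PySem.Chars.isIn "bold".toList low || PySem.Chars.isIn "assertive".toList low then [noteConfident] else [])
      ++ (if PySem.Chars.isIn "playful".toList low || PySem.Chars.isIn "teasing".toList low then [notePlayful] else [])
      ++ (if PySem.Chars.isIn "dominant".toList low then [noteDominant] else [])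
      ++ (if PySem.Chars.isIn "submissive".toList low then [noteSubmissive] else [])
      ++ (if PySem.Chars.isIn "innocent".toList low || PySem.Chars.isIn "naive".toList low then [noteInnocent] else [])
      ++ (if PySem.Chars.isIn "flirty".toList low || PySem.Chars.isIn "seductive".toList low then [noteFlirty] else [])
      ++ (if PySem.Chars.isIn "romantic".toList low then [noteRomantic] else []) := by
  rw [show List.range pvNotes.length = [0, 1, 2, 3, 4, 5, 6, 7] from by decide]
  rw [map_filter_eq_flatMap]
  simp only [contains_found, List.flatMap_cons, List.flatMap_nil]
  simp [pvKeywords, pvNotes, List.getD, Bool.or_assoc, List.append_assoc]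
  split_ifs <;> rfl

-- ===== VERDICT (by name: the statement is the Claim_ definition above) =====
set_option maxHeartbeats 4000000 in
theorem build_dialogue_prompt_spec : Claim_equal_build_dialogue_prompt := by
  intro name extra_prompt _
  show _ = _
  simp only [build_dialogue_prompt, build_dialogue_prompt_alt]
  rw [notesB_eq]
  simp only [ite_append, List.nil_append, Bool.or_assoc]
  simp [List.append_assoc]
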